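-- pv_equiv track=rewrite | github.com/soupstream/lua-5.1-bigint | tests/testutils.py | unsetbits
-- ===== SOURCE A (Python) =====
-- def sign(n):
--     if n > 0:
--         return 1
--     elif n < 0:
--         return -1
--     else:
--         return 0
--
-- def unsetbits(n, bits):
--     s = sign(n) or 1
--     n = abs(n)
--     for bit in bits:
--         mask = 1 << bit
--         if n & mask != 0:
--             n ^= mask
--     return n * s
-- ===== SOURCE B (Python) =====
-- def unsetbits(n, bits):
--     s = -1 if n < 0 else 1
--     mask = 0
--     for bit in bits:
--         mask |= 1 << bit
--     return (abs(n) & ~mask) * s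
-- ===== Notes on version B (the rewrite author's own statement) =====
-- stated objective: simpler
-- what changed: Instead of conditionally XOR-clearing each bit from n inside the loop, B ORs all bit positions into one combined mask and clears them all with a single n & ~mask at the end.
import Mathlib
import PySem

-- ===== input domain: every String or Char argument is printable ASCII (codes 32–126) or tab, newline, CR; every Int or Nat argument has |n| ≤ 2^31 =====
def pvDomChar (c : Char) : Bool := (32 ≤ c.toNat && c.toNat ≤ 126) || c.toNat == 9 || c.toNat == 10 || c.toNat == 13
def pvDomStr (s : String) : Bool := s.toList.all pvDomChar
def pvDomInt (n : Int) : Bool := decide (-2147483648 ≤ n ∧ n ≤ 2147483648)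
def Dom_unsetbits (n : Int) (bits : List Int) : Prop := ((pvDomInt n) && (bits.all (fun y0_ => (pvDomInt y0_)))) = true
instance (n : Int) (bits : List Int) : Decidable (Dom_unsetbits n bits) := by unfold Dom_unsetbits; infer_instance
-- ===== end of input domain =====

-- B ORs all bit positions into one mask and clears them from |n| with a single AND-NOT,
-- instead of A's conditional XOR-clear of each bit inside the loop (objective: simpler).


-- ===== PORT A =====
def unsetbits (n : Int) (bits : List Int) : Int :=
  let s0 : Int := if n > 0 then 1 else if n < 0 then -1 else 0
  let s : Int := if s0 = 0 then 1 else s0        -- `sign(n) or 1`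
  let m : Int := bits.foldl (fun acc bit =>
    let mask : Int := ((1 <<< bit.toNat : Nat) : Int)   -- `1 << bit` (bit ≥ 0 by Pre_)
    if PySem.Int.band acc mask ≠ 0 then PySem.Int.bxor acc mask else acc) |n|
  m * s

-- ===== PORT B =====
def unsetbits_alt (n : Int) (bits : List Int) : Int :=
  let s : Int := if n < 0 then -1 else 1
  let mask : Int := bits.foldl (fun m bit => PySem.Int.bor m ((1 <<< bit.toNat : Nat) : Int)) 0
  PySem.Int.band |n| (Int.not mask) * s

-- ===== PRECONDITION & SPEC =====
-- Pre_ excludes only inputs where Python A raises: `1 << bit` raises ValueError for a negative bit.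
def Pre_unsetbits (n : Int) (bits : List Int) : Prop := ∀ b ∈ bits, 0 ≤ b
instance (n : Int) (bits : List Int) : Decidable (Pre_unsetbits n bits) := by unfold Pre_unsetbits; infer_instance
def pvWitness_unsetbits : Int × List Int := (-21, [0, 2, 7])

def Spec_unsetbits (n : Int) (bits : List Int) (out : Int) : Prop := out = unsetbits_alt n bits
instance (n : Int) (bits : List Int) (out : Int) : Decidable (Spec_unsetbits n bits out) := by unfold Spec_unsetbits; infer_instance

-- ===== CLAIM (what is proved, stated in full; the proofs are below) =====
def Claim_equal_unsetbits : Prop := ∀ (n : Int) (bits : List Int), Dom_unsetbits n bits → Pre_unsetbits n bits → Spec_unsetbits n bits (unsetbits n bits)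

-- ===== LEMMAS AND PROOFS =====

-- x and y have no common bit → xor is addition
theorem pv_disj_xor_eq_add : ∀ x y : Nat, x &&& y = 0 → x ^^^ y = x + y := by
  intro x
  induction x using Nat.strong_induction_on with
  | _ x ih =>
    intro y h
    rcases Nat.eq_zero_or_pos x with hx | hx
    · simp [hx]
    · have h2 : x / 2 &&& y / 2 = 0 := by rw [← Nat.and_div_two, h]
      have ihx := ih (x / 2) (Nat.div_lt_self hx (by norm_num)) (y / 2) h2
      have hm : x % 2 &&& y % 2 = 0 := by
        have h0 : (x &&& y) % 2 ^ 1 = 0 := by rw [h]; rfl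
        rw [Nat.and_mod_two_pow] at h0
        simpa using h0
      have hxor2 : (x ^^^ y) % 2 = x % 2 ^^^ y % 2 := by
        simpa using Nat.xor_mod_two_pow (n := 1)
      have hdiv : (x ^^^ y) / 2 = x / 2 ^^^ y / 2 := Nat.xor_div_two
      have hkey : (x ^^^ y) = 2 * ((x ^^^ y) / 2) + (x ^^^ y) % 2 := by omega
      rcases Nat.mod_two_eq_zero_or_one x with hx2 | hx2 <;>
        rcases Nat.mod_two_eq_zero_or_one y with hy2 | hy2
      · rw [hkey, hdiv, hxor2, ihx, hx2, hy2]; simp; omega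
      · rw [hkey, hdiv, hxor2, ihx, hx2, hy2]; simp; omega
      · rw [hkey, hdiv, hxor2, ihx, hx2, hy2]; simp; omega
      · rw [hx2, hy2] at hm; exact absurd hm (by decide)

-- b = m &&& M is a submask of m, so subtracting it is XOR-ing it
theorem pv_sub_and_eq_xor_and (m M : Nat) : m - (m &&& M) = m ^^^ (m &&& M) := by
  set b := m &&& M with hb
  have hmb : m &&& b = b := by rw [hb, ← Nat.and_assoc, Nat.and_self]
  have hdisj : (m ^^^ b) &&& b = 0 := by
    rw [Nat.and_xor_distrib_right, hmb, Nat.and_self, Nat.xor_self]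
  have hadd := pv_disj_xor_eq_add (m ^^^ b) b hdisj
  have hxb : (m ^^^ b) ^^^ b = m := by rw [Nat.xor_assoc, Nat.xor_self, Nat.xor_zero]
  have hble : b ≤ m := Nat.and_le_left
  omega

-- the Nat-level A step clears bit k
theorem pv_stepA_eq (m k : Nat) :
    (if m &&& 2 ^ k ≠ 0 then m ^^^ 2 ^ k else m) = m ^^^ (m &&& 2 ^ k) := by
  have h : m &&& 2 ^ k = if m.testBit k then 2 ^ k else 0 := by
    apply Nat.eq_of_testBit_eq
    intro i
    by_cases hik : i = k
    · subst hik; cases hm : m.testBit i <;> simp [Nat.testBit_and, hm, Nat.testBit_two_pow_self]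
    · have h2 : (2 ^ k).testBit i = false := Nat.testBit_two_pow_of_ne (fun hk => hik hk.symm)
      cases hm : m.testBit k <;> simp [Nat.testBit_and, h2, Nat.zero_testBit]
  rw [h]
  cases hm : m.testBit k <;> simp

-- composing two clears is clearing the union
theorem pv_clear_clear (m a b : Nat) :
    (m ^^^ (m &&& a)) ^^^ ((m ^^^ (m &&& a)) &&& b) = m ^^^ (m &&& (a ||| b)) := by
  apply Nat.eq_of_testBit_eq
  intro i
  simp only [Nat.testBit_xor, Nat.testBit_and, Nat.testBit_or]
  cases m.testBit i <;> cases a.testBit i <;> cases b.testBit i <;> rfl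

def pv_orM (ks : List Nat) (acc : Nat) : Nat := ks.foldl (fun M k => M ||| 2 ^ k) acc

theorem pv_orM_pull (ks : List Nat) (acc : Nat) : pv_orM ks acc = acc ||| pv_orM ks 0 := by
  induction ks generalizing acc with
  | nil => simp [pv_orM]
  | cons k ks ih =>
      show pv_orM ks (acc ||| 2 ^ k) = acc ||| pv_orM ks (0 ||| 2 ^ k)
      rw [ih (acc ||| 2 ^ k), ih (0 ||| 2 ^ k)]
      simp [Nat.or_assoc]

theorem pv_loop_eq (ks : List Nat) (m : Nat) :
    ks.foldl (fun a k => if a &&& 2 ^ k ≠ 0 then a ^^^ 2 ^ k else a) m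
      = m ^^^ (m &&& pv_orM ks 0) := by
  induction ks generalizing m with
  | nil => simp [pv_orM]
  | cons k ks ih =>
      simp only [List.foldl_cons]
      rw [ih, pv_stepA_eq]
      have horm : pv_orM (k :: ks) 0 = 2 ^ k ||| pv_orM ks 0 := by
        show pv_orM ks (0 ||| 2 ^ k) = 2 ^ k ||| pv_orM ks 0
        rw [pv_orM_pull ks (0 ||| 2 ^ k)]
        simp
      rw [horm, ← pv_clear_clear]

-- Int fold of A's loop equals the Nat fold
theorem pv_foldA_cast (bits : List Int) (a : Nat) :
    bits.foldl (fun acc bit =>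
        let mask : Int := ((1 <<< bit.toNat : Nat) : Int)
        if PySem.Int.band acc mask ≠ 0 then PySem.Int.bxor acc mask else acc) (a : Int)
      = (((bits.map Int.toNat).foldl
          (fun a k => if a &&& 2 ^ k ≠ 0 then a ^^^ 2 ^ k else a) a : Nat) : Int) := by
  induction bits generalizing a with
  | nil => rfl
  | cons b bs ih =>
      simp only [List.foldl_cons, List.map_cons]
      rw [show ((1 <<< b.toNat : Nat) : Int) = ((2 ^ b.toNat : Nat) : Int) by rw [Nat.one_shiftLeft]]
      rw [PySem.Int.band_natCast, PySem.Int.bxor_natCast]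
      by_cases h : a &&& 2 ^ b.toNat = 0
      · simpa [h] using ih a
      · simpa [h] using ih (a ^^^ 2 ^ b.toNat)

-- Int fold of B's mask loop equals the Nat fold
theorem pv_foldB_cast (bits : List Int) (a : Nat) :
    bits.foldl (fun m bit => PySem.Int.bor m ((1 <<< bit.toNat : Nat) : Int)) (a : Int)
      = ((pv_orM (bits.map Int.toNat) a : Nat) : Int) := by
  induction bits generalizing a with
  | nil => rfl
  | cons b bs ih =>
      simp only [List.foldl_cons, List.map_cons]
      rw [show ((1 <<< b.toNat : Nat) : Int) = ((2 ^ b.toNat : Nat) : Int) by rw [Nat.one_shiftLeft]]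
      rw [PySem.Int.bor_natCast, ih]
      rfl

theorem pv_foldB_cast0 (bits : List Int) :
    bits.foldl (fun m bit => PySem.Int.bor m ((1 <<< bit.toNat : Nat) : Int)) (0 : Int)
      = ((pv_orM (bits.map Int.toNat) 0 : Nat) : Int) := by
  simpa using pv_foldB_cast bits 0

-- band of a Nat with the complement of a Nat
theorem pv_band_not (m M : Nat) :
    PySem.Int.band (m : Int) (Int.not (M : Int)) = ((m - (m &&& M) : Nat) : Int) := by
  have h1 : Int.not (M : Int) = -(M : Int) - 1 := by
    show Int.not (Int.ofNat M) = _
    simp [Int.not]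
    omega
  rw [h1]
  have h2 : ¬ (0 : Int) ≤ -(M : Int) - 1 := by omega
  simp only [PySem.Int.band, Int.natCast_nonneg, if_true, h2, if_false]
  have h3 : (-(-(M : Int) - 1) - 1).toNat = M := by omega
  rw [h3]
  simp

-- ===== VERDICT (by name: the statement is the Claim_ definition above) =====
theorem unsetbits_spec : Claim_equal_unsetbits := by
  intro n bits _ _
  have habs : |n| = ((n.natAbs : Nat) : Int) := by
    rw [Int.abs_eq_natAbs]
  unfold Spec_unsetbits
  simp only [unsetbits, unsetbits_alt, habs]
  rw [pv_foldA_cast, pv_loop_eq, pv_foldB_cast0, pv_band_not, pv_sub_and_eq_xor_and]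
  have hsign : (if (if n > 0 then (1:Int) else if n < 0 then -1 else 0) = 0 then (1:Int)
      else if n > 0 then 1 else if n < 0 then -1 else 0) = if n < 0 then -1 else 1 := by
    split_ifs <;> omega
  rw [hsign]
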